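-- pv_equiv track=rewrite | github.com/binref/refinery | refinery/units/scripting/cmdarg.py | _strip_outer_quotes
-- ===== SOURCE A (Python) =====
-- def _strip_outer_quotes(text: str) -> str:
--     text = text.strip()
--     if len(text) < 2 or text[0] != '"':
--         return text
--     k = len(text) - 1
--     if text[k] != '"':
--         return text
--     bs = 0
--     j = k - 1
--     while j >= 0 and text[j] == '\\':
--         bs += 1
--         j -= 1
--     if bs % 2 == 0:
--         return text[1:k]
--     return text
-- ===== SOURCE B (Python) =====
-- def _strip_outer_quotes(text: str) -> str:
--     text = text.strip()
--     if len(text) >= 2 and text[0] == '"' and text[-1] == '"':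
--         inner = text[1:-1]
--         i = 0
--         while i < len(inner):
--             i += 2 if inner[i] == '\\' else 1
--         if i == len(inner):
--             return inner
--     return text
-- ===== Notes on version B (the rewrite author's own statement) =====
-- stated objective: alternative
-- what changed: Replaces A's backward scan that counts the trailing backslash run and tests its parity with a forward tokenizer over the interior that consumes escaped pairs in jumps of two; the closing quote is unescaped iff the scan lands exactly on the end.
import Mathlib
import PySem

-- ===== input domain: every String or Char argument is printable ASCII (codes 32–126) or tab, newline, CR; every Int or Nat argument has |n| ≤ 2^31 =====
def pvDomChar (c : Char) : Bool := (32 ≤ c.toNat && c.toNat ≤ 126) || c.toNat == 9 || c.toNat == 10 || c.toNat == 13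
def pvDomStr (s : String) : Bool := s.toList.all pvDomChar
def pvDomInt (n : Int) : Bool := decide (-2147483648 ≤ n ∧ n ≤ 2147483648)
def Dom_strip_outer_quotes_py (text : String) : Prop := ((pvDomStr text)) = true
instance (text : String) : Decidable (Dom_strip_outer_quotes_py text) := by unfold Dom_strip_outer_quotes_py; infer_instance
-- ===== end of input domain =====

-- B replaces A's backward count of the trailing backslash run by a forward escape-pair tokenizer; same results, similar cost.

-- ===== PORT A =====
-- the loop 'while j >= 0 and text[j] == '\\': bs += 1; j -= 1', indexed by jn = j + 1 (jn = 0 is j = -1)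
def pvCountBS (cs : List Char) (bs : Int) : Nat → Int
  | 0 => bs
  | j + 1 => if cs.getD j ' ' = '\\' then pvCountBS cs (bs + 1) j else bs

def strip_outer_quotes_py (text : String) : String :=
  let cs := (PySem.Str.strip text).toList
  if cs.length < 2 ∨ cs.getD 0 ' ' ≠ '"' then String.ofList cs
  else
    -- k = len(text) - 1 (a valid index: the guard gives 2 ≤ len, so Nat subtraction is exact)
    let k := cs.length - 1
    if cs.getD k ' ' ≠ '"' then String.ofList cs
    else if PySem.Int.mod (pvCountBS cs 0 k) 2 = 0 then
      String.ofList (PySem.List.slice cs (some 1) (some (k : Int)))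
    else String.ofList cs

-- ===== PORT B =====
-- the loop 'while i < len(inner): i += 2 if inner[i] == '\\' else 1' plus the final test 'i == len(inner)'
def pvScan : List Char → Bool
  | [] => true
  | c :: rest =>
    if c = '\\' then
      match rest with
      | [] => false          -- i jumps past the end: i ≠ len(inner)
      | _ :: r => pvScan r
    else pvScan rest

def strip_outer_quotes_py_alt (text : String) : String :=
  let cs := (PySem.Str.strip text).toList
  if 2 ≤ cs.length ∧ cs.getD 0 ' ' = '"' ∧ PySem.List.pyGetD cs (-1) ' ' = '"' then
    let inner := PySem.List.slice cs (some 1) (some (-1))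
    if pvScan inner then String.ofList inner else String.ofList cs
  else String.ofList cs

-- ===== PRECONDITION & SPEC =====
def Spec_strip_outer_quotes_py (text : String) (out : String) : Prop := out = strip_outer_quotes_py_alt text
instance (text : String) (out : String) : Decidable (Spec_strip_outer_quotes_py text out) := by unfold Spec_strip_outer_quotes_py; infer_instance

-- ===== CLAIM (what is proved, stated in full; the proofs are below) =====
def Claim_equal_strip_outer_quotes_py : Prop := ∀ (text : String), Dom_strip_outer_quotes_py text → Spec_strip_outer_quotes_py text (strip_outer_quotes_py text)

-- ===== LEMMAS AND PROOFS =====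

-- length of the trailing run of backslashes, computed structurally from the front
def pvTW : List Char → Nat
  | [] => 0
  | c :: l => if c = '\\' ∧ pvTW l = l.length then pvTW l + 1 else pvTW l

theorem pvTW_le (l : List Char) : pvTW l ≤ l.length := by
  induction l with
  | nil => simp [pvTW]
  | cons c l ih => simp only [pvTW, List.length_cons]; split_ifs <;> omega

theorem pvTW_cons_ne (c : Char) (l : List Char) (h : c ≠ '\\') : pvTW (c :: l) = pvTW l := by
  simp [pvTW, h]

theorem pvTW_append_singleton (l : List Char) (c : Char) :
    pvTW (l ++ [c]) = if c = '\\' then pvTW l + 1 else 0 := by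
  induction l with
  | nil => by_cases h : c = '\\' <;> simp [pvTW, h]
  | cons x l ih =>
    have hle := pvTW_le l
    by_cases h : c = '\\'
    · rw [if_pos h] at ih ⊢
      by_cases hx : x = '\\'
      · simp only [List.cons_append, pvTW, ih, hx, true_and, List.length_append,
          List.length_cons, List.length_nil]
        split_ifs <;> omega
      · simp [List.cons_append, pvTW_cons_ne x _ hx, ih]
    · rw [if_neg h] at ih ⊢
      simp only [List.cons_append, pvTW, ih]
      have hne : ¬ (x = '\\' ∧ (0 : Nat) = (l ++ [c]).length) := by simp
      rw [if_neg hne]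

theorem pvScan_eq (l : List Char) : pvScan l = decide (pvTW l % 2 = 0) := by
  induction l using pvScan.induct with
  | case1 => simp [pvScan, pvTW]
  | case2 => simp [pvScan, pvTW]
  | case3 d r ih =>
    have hle := pvTW_le r
    have hpar : pvTW ('\\' :: d :: r) % 2 = pvTW r % 2 := by
      by_cases hd : d = '\\'
      · simp only [pvTW, hd, true_and, List.length_cons]
        split_ifs <;> omega
      · simp only [pvTW, hd, false_and, if_false, List.length_cons]
        split_ifs <;> omega
    rw [show pvScan ('\\' :: d :: r) = pvScan r from rfl, ih, hpar]
  | case4 c rest hc ih =>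
    rw [show pvScan (c :: rest) = pvScan rest from by rw [pvScan.eq_def]; simp [hc], ih,
      pvTW_cons_ne c rest hc]

theorem pvCountBS_eq (cs : List Char) (bs : Int) (j : Nat) (hj : j ≤ cs.length) :
    pvCountBS cs bs j = bs + (pvTW (cs.take j) : Int) := by
  induction j generalizing bs with
  | zero => simp [pvCountBS, pvTW]
  | succ j ih =>
    have hjl : j < cs.length := by omega
    have hget : cs.getD j ' ' = cs[j] := List.getD_eq_getElem cs ' ' hjl
    have htake : cs.take (j + 1) = cs.take j ++ [cs[j]] := by
      rw [List.take_add_one]; simp [List.getElem?_eq_getElem hjl]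
    rw [pvCountBS, hget, htake, pvTW_append_singleton]
    by_cases h : cs[j] = '\\'
    · rw [if_pos h, if_pos h, ih (bs + 1) (by omega)]; push_cast; ring
    · rw [if_neg h, if_neg h]; simp

theorem pvGetLastD (cs : List Char) (h : cs ≠ []) :
    PySem.List.pyGetD cs (-1) ' ' = cs.getD (cs.length - 1) ' ' := by
  rw [PySem.List.pyGetD_neg_one cs ' ' h, List.getLast_eq_getElem,
    List.getD_eq_getElem cs ' ' (by have := List.length_pos_iff.mpr h; omega)]

theorem pvMod2 (m : Nat) : PySem.Int.mod (m : Int) 2 = 0 ↔ m % 2 = 0 := by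
  unfold PySem.Int.mod
  rw [Int.fmod_eq_emod]
  norm_num
  omega

-- the core equivalence, over the already-stripped character list
theorem pv_core (cs : List Char) :
    (if cs.length < 2 ∨ cs.getD 0 ' ' ≠ '"' then String.ofList cs
     else
       let k := cs.length - 1
       if cs.getD k ' ' ≠ '"' then String.ofList cs
       else if PySem.Int.mod (pvCountBS cs 0 k) 2 = 0 then
         String.ofList (PySem.List.slice cs (some 1) (some (k : Int)))
       else String.ofList cs) =
    (if 2 ≤ cs.length ∧ cs.getD 0 ' ' = '"' ∧ PySem.List.pyGetD cs (-1) ' ' = '"' then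
       let inner := PySem.List.slice cs (some 1) (some (-1))
       if pvScan inner then String.ofList inner else String.ofList cs
     else String.ofList cs) := by
  by_cases hB : 2 ≤ cs.length ∧ cs.getD 0 ' ' = '"' ∧ PySem.List.pyGetD cs (-1) ' ' = '"'
  · obtain ⟨hlen, h0, hlast⟩ := hB
    conv_rhs => rw [if_pos (And.intro hlen (And.intro h0 hlast))]
    obtain ⟨c0, rest⟩ : ∃ c0 rest, cs = c0 :: rest := by
      cases cs with
      | nil => simp at hlen
      | cons a b => exact ⟨a, b, rfl⟩
    obtain ⟨rest, rfl⟩ := rest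
    rcases rest.eq_nil_or_concat with rfl | ⟨mid, lastc, hml⟩
    · simp at hlen
    have hml' : rest = mid ++ [lastc] := by simpa using hml
    subst hml'
    have hc0 : c0 = '"' := by simpa using h0
    have hcat : c0 :: (mid ++ [lastc]) = (c0 :: mid) ++ [lastc] := by simp
    have hlastc : lastc = '"' := by
      rw [hcat, PySem.List.pyGetD_neg_one_append_singleton] at hlast
      exact hlast
    have hlenc : (c0 :: (mid ++ [lastc])).length = mid.length + 2 := by simp
    rw [if_neg (fun hor => hor.elim (fun h => by rw [hlenc] at h; omega) (fun h => h h0))]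
    simp only [hlenc]
    have hkidx : mid.length + 2 - 1 = mid.length + 1 := by omega
    rw [hkidx]
    have hklast : (c0 :: (mid ++ [lastc])).getD (mid.length + 1) ' ' = '"' := by
      have := pvGetLastD (c0 :: (mid ++ [lastc])) (by simp)
      rw [hlenc, hkidx] at this
      rw [← this, hlast]
    rw [if_neg (by simp [hlastc])]
    have hcount : pvCountBS (c0 :: (mid ++ [lastc])) 0 (mid.length + 1) =
        (pvTW mid : Int) := by
      rw [pvCountBS_eq _ 0 _ (by simp)]
      have ht : (c0 :: (mid ++ [lastc])).take (mid.length + 1) = c0 :: mid := by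
        simp [List.take_succ_cons]
      rw [ht, pvTW_cons_ne c0 mid (by rw [hc0]; decide)]
      ring
    have hsliceA : PySem.List.slice (c0 :: (mid ++ [lastc])) (some 1)
        (some ((mid.length + 1 : Nat) : Int)) = mid := by
      have h1 : ((1 : Nat) : Int) = (1 : Int) := by norm_num
      rw [← h1, PySem.List.slice_natCast]
      simp
    have hsliceB : PySem.List.slice (c0 :: (mid ++ [lastc])) (some 1) (some (-1)) = mid := by
      simp [PySem.List.slice, PySem.List.clampIdx]
      rw [if_neg (by omega)]
      simp
    rw [hcount, hsliceA]
    simp only [hsliceB, pvScan_eq]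
    by_cases hp : pvTW mid % 2 = 0
    · rw [if_pos ((pvMod2 _).mpr hp), if_pos (by simp [hp])]
    · rw [if_neg (fun h => hp ((pvMod2 _).mp h)), if_neg (by simp [hp])]
  · rw [if_neg hB]
    by_cases hA : cs.length < 2 ∨ cs.getD 0 ' ' ≠ '"'
    · rw [if_pos hA]
    · rw [not_or, not_lt, not_not] at hA
      obtain ⟨hlen, h0⟩ := hA
      rw [if_neg (fun hor => hor.elim (fun h => by omega) (fun h => h h0))]
      have hne : cs ≠ [] := by intro h; rw [h] at hlen; simp at hlen
      have hklast : cs.getD (cs.length - 1) ' ' ≠ '"' := by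
        intro h
        exact hB ⟨by omega, h0, by rw [pvGetLastD cs hne, h]⟩
      rw [if_pos hklast]

-- ===== VERDICT (by name: the statement is the Claim_ definition above) =====
theorem strip_outer_quotes_py_spec : Claim_equal_strip_outer_quotes_py := by
  intro text _
  unfold Spec_strip_outer_quotes_py strip_outer_quotes_py strip_outer_quotes_py_alt
  exact pv_core _
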